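-- pv_equiv track=rewrite | github.com/Ssxpn/BD-1_TTS | text_to_speech_v2.py | map_letters_to_sound_groups
-- ===== SOURCE A (Python) =====
-- BSP_GROUPS = {
--     "B": {"b", "p", "d", "t", "k", "g", "q", "c"},
--     "S": {"s", "z", "f", "v", "j", "x", "h"},
--     "P": {"l", "m", "n", "r"}
-- }
--
-- def map_letters_to_sound_groups(text):
--     result = []
--     for c in text:
--         c_lower = c.lower()
--         for group, letters in BSP_GROUPS.items():
--             if c_lower in letters:
--                 result.append(group)
--                 break
--         else:
--             result.append(c_lower)
--     return result
-- ===== SOURCE B (Python) =====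
-- BSP_GROUPS = {
--     "B": {"b", "p", "d", "t", "k", "g", "q", "c"},
--     "S": {"s", "z", "f", "v", "j", "x", "h"},
--     "P": {"l", "m", "n", "r"}
-- }
--
-- # Reverse lookup built once: letter -> group (groups are disjoint).
-- _REV = {letter: group for group, letters in BSP_GROUPS.items() for letter in letters}
--
-- def map_letters_to_sound_groups(text):
--     return [_REV.get(cl, cl) for cl in (c.lower() for c in text)]
-- ===== Notes on version B (the rewrite author's own statement) =====
-- stated objective: idiomatic
-- what changed: B inverts BSP_GROUPS once into a letter-to-group dict, so the per-character for...else scan over the three group sets disappears into a single-pass comprehension with dict.get's default.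
import Mathlib
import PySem

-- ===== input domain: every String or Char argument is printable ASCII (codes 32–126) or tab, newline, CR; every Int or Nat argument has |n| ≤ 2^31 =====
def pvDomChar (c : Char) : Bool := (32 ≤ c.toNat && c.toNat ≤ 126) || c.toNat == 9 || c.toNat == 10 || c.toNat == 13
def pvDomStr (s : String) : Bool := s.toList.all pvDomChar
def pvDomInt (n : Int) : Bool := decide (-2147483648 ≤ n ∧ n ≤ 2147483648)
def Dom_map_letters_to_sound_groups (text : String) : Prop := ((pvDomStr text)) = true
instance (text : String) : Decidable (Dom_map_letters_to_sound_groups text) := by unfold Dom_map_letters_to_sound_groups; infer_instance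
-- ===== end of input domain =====

-- B inverts BSP_GROUPS into one letter→group dict so each char is a single lookup
-- instead of a scan over the three groups (idiomatic; exact return value).

-- module constant BSP_GROUPS (used by both programs)
def pvBSPGroups : List (String × PySem.Set Char) :=
  [("B", PySem.Set.ofList ['b', 'p', 'd', 't', 'k', 'g', 'q', 'c']),
   ("S", PySem.Set.ofList ['s', 'z', 'f', 'v', 'j', 'x', 'h']),
   ("P", PySem.Set.ofList ['l', 'm', 'n', 'r'])]

-- ===== PORT A =====
-- the inner 'for group, letters in BSP_GROUPS.items(): … break / else' loop
def pvScanGroups (cl : Char) : List (String × PySem.Set Char) → Option String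
  | [] => none
  | (g, letters) :: rest =>
      if PySem.Set.contains letters cl then some g else pvScanGroups cl rest

def map_letters_to_sound_groups (text : String) : List String :=
  text.toList.foldl (fun result c =>
    let cl := PySem.Chars.lowerChar c
    match pvScanGroups cl pvBSPGroups with
    | some g => result ++ [g]
    | none => result ++ [String.ofList [cl]]) []

-- ===== PORT B =====
-- _REV = {letter: group for group, letters in BSP_GROUPS.items() for letter in letters}
def pvRev : PySem.Dict Char String :=
  pvBSPGroups.foldl (fun d p => p.2.foldl (fun d l => d.insert l p.1) d) PySem.Dict.empty

def map_letters_to_sound_groups_alt (text : String) : List String :=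
  (text.toList.map PySem.Chars.lowerChar).map
    (fun cl => pvRev.getD cl (String.ofList [cl]))

-- ===== PRECONDITION & SPEC =====
def Spec_map_letters_to_sound_groups (text : String) (out : List String) : Prop := out = map_letters_to_sound_groups_alt text
instance (text : String) (out : List String) : Decidable (Spec_map_letters_to_sound_groups text out) := by unfold Spec_map_letters_to_sound_groups; infer_instance

-- ===== CLAIM (what is proved, stated in full; the proofs are below) =====
def Claim_equal_map_letters_to_sound_groups : Prop := ∀ (text : String), Dom_map_letters_to_sound_groups text → Spec_map_letters_to_sound_groups text (map_letters_to_sound_groups text)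

-- ===== LEMMAS AND PROOFS =====

-- the 16 letters appearing in any group
def pvAllLetters : List Char :=
  ['b', 'p', 'd', 't', 'k', 'g', 'q', 'c', 's', 'z', 'f', 'v', 'j', 'x', 'h', 'l', 'm', 'n', 'r']

-- per-character agreement between A's group scan and B's reverse-dict lookup
theorem pvStep_eq (cl : Char) :
    (match pvScanGroups cl pvBSPGroups with
     | some g => g
     | none => String.ofList [cl]) = pvRev.getD cl (String.ofList [cl]) := by
  by_cases h : cl ∈ pvAllLetters
  · fin_cases h <;> decide
  · simp only [pvAllLetters, List.mem_cons, List.not_mem_nil, or_false] at h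
    push Not at h
    obtain ⟨h1, h2, h3, h4, h5, h6, h7, h8, h9, h10, h11, h12, h13, h14, h15, h16, h17, h18, h19⟩ := h
    have hitems : pvRev.items = [('b',"B"),('p',"B"),('d',"B"),('t',"B"),('k',"B"),('g',"B"),('q',"B"),('c',"B"),('s',"S"),('z',"S"),('f',"S"),('v',"S"),('j',"S"),('x',"S"),('h',"S"),('l',"P"),('m',"P"),('n',"P"),('r',"P")] := by decide
    have hfind : List.find? (fun p => p.1 == cl) pvRev.items = none := by
      rw [hitems, List.find?_eq_none]
      intro p hp
      fin_cases hp <;> simp [Ne.symm h1, Ne.symm h2, Ne.symm h3, Ne.symm h4, Ne.symm h5, Ne.symm h6, Ne.symm h7, Ne.symm h8, Ne.symm h9, Ne.symm h10, Ne.symm h11, Ne.symm h12, Ne.symm h13, Ne.symm h14, Ne.symm h15, Ne.symm h16, Ne.symm h17, Ne.symm h18, Ne.symm h19]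
    have hget : pvRev.getD cl (String.ofList [cl]) = String.ofList [cl] := by
      simp [PySem.Dict.getD, PySem.Dict.get?, hfind]
    rw [hget]
    simp [pvScanGroups, pvBSPGroups, PySem.Set.contains, PySem.Set.ofList,
      h1, h2, h3, h4, h5, h6, h7, h8, h9, h10, h11, h12, h13, h14, h15, h16, h17, h18, h19]

theorem pvFold_eq (cs : List Char) (acc : List String) :
    cs.foldl (fun result c =>
      let cl := PySem.Chars.lowerChar c
      match pvScanGroups cl pvBSPGroups with
      | some g => result ++ [g]
      | none => result ++ [String.ofList [cl]]) acc
    = acc ++ (cs.map PySem.Chars.lowerChar).map (fun cl => pvRev.getD cl (String.ofList [cl])) := by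
  induction cs generalizing acc with
  | nil => simp
  | cons c rest ih =>
      simp only [List.foldl_cons, List.map_cons]
      rw [ih]
      have h := pvStep_eq (PySem.Chars.lowerChar c)
      rw [← h]
      cases hscan : pvScanGroups (PySem.Chars.lowerChar c) pvBSPGroups <;> simp

-- ===== VERDICT (by name: the statement is the Claim_ definition above) =====
theorem map_letters_to_sound_groups_spec : Claim_equal_map_letters_to_sound_groups := by
  intro text _
  unfold Spec_map_letters_to_sound_groups map_letters_to_sound_groups map_letters_to_sound_groups_alt
  simpa using pvFold_eq text.toList []
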